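-- pv_equiv track=rewrite | github.com/Som-Energia/legal-texts | legaltexts/cli.py | analyze_blocks
-- ===== SOURCE A (Python) =====
-- def analyze_blocks(f):
--     """
--     Returns an array of blocks (md paragraph),
--     composed each by an array of lines.
--     """
--     blocks = [[]]
--     for line in f:
--         if not line.strip() :
--             blocks.append([])
--             continue
--         blocks[-1].append(line)
--     return blocks
-- ===== SOURCE B (Python) =====
-- def analyze_blocks(f):
--     """
--     Returns an array of blocks (md paragraph),
--     composed each by an array of lines.
--     Recursive split-at-first-blank-line decomposition.
--     """
--     lines = list(f)
--     for i, line in enumerate(lines):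
--         if not line.strip():
--             return [lines[:i]] + analyze_blocks(lines[i + 1:])
--     return [lines]
-- ===== Notes on version B (the rewrite author's own statement) =====
-- stated objective: alternative
-- what changed: Replaces A's single fold that mutates the last block of an accumulator with a recursive decomposition that finds the first blank line and splits the list there (emit the prefix slice, recurse on the rest).
import Mathlib
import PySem

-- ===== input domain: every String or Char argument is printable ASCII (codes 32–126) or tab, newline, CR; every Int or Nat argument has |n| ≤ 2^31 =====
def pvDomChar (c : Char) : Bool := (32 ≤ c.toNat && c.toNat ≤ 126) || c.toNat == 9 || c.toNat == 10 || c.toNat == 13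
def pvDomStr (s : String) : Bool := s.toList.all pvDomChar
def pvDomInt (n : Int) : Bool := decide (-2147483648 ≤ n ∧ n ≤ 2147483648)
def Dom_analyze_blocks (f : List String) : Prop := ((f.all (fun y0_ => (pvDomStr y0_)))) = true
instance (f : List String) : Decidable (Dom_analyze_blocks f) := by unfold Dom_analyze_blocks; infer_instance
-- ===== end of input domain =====

-- B replaces A's fold-with-mutable-last-block by a recursive split at the first blank line; objective: alternative decomposition.


-- ===== PORT A =====
-- loop body: `if not line.strip(): blocks.append([])` else `blocks[-1].append(line)`;
-- blocks stays nonempty throughout, so blocks[-1] is getLast! and the in-place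
-- append to it is dropLast ++ [last ++ [line]]
def pvStepA (blocks : List (List String)) (line : String) : List (List String) :=
  if PySem.Str.strip line = "" then blocks ++ [[]]
  else blocks.dropLast ++ [blocks.getLast! ++ [line]]

def analyze_blocks (f : List String) : List (List String) :=
  List.foldl pvStepA [[]] f

-- ===== PORT B =====
-- `for i, line in enumerate(lines): if not line.strip(): <return at i>`
-- = index of the first blank line, none if the loop falls through
def pvFirstBlank : List String → Option Nat
  | [] => none
  | l :: rest => if PySem.Str.strip l = "" then some 0 else (pvFirstBlank rest).map (· + 1)

-- needed by analyze_blocks_alt's termination argument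
theorem pvFirstBlank_lt : ∀ (f : List String) (i : Nat), pvFirstBlank f = some i → i < f.length := by
  intro f
  induction f with
  | nil => intro i h; simp [pvFirstBlank] at h
  | cons l rest ih =>
    intro i h
    simp only [pvFirstBlank] at h
    split at h
    · simp only [Option.some.injEq] at h
      simp [← h]
    · cases hr : pvFirstBlank rest with
      | none => simp [hr] at h
      | some j =>
        simp [hr] at h
        have := ih j hr
        simp [← h, List.length_cons]
        omega

-- lines[:i] with 0 ≤ i is List.take i, lines[i+1:] is List.drop (i+1) (exact for nonnegative indices)
def analyze_blocks_alt (f : List String) : List (List String) :=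
  match h : pvFirstBlank f with
  | none => [f]
  | some i => f.take i :: analyze_blocks_alt (f.drop (i + 1))
termination_by f.length
decreasing_by
  have := pvFirstBlank_lt f i h
  simp [List.length_drop]
  omega

-- ===== PRECONDITION & SPEC =====
def Spec_analyze_blocks (f : List String) (out : List (List String)) : Prop := out = analyze_blocks_alt f
instance (f : List String) (out : List (List String)) : Decidable (Spec_analyze_blocks f out) := by unfold Spec_analyze_blocks; infer_instance

-- ===== CLAIM (what is proved, stated in full; the proofs are below) =====
def Claim_equal_analyze_blocks : Prop := ∀ (f : List String), Dom_analyze_blocks f → Spec_analyze_blocks f (analyze_blocks f)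

-- ===== LEMMAS AND PROOFS =====

theorem alt_eq_none (f : List String) (h : pvFirstBlank f = none) :
    analyze_blocks_alt f = [f] := by
  rw [analyze_blocks_alt]
  split <;> simp_all

theorem alt_eq_some (f : List String) (i : Nat) (h : pvFirstBlank f = some i) :
    analyze_blocks_alt f = f.take i :: analyze_blocks_alt (f.drop (i + 1)) := by
  rw [analyze_blocks_alt]
  split <;> simp_all

theorem alt_ne_nil (f : List String) : analyze_blocks_alt f ≠ [] := by
  rw [analyze_blocks_alt]
  split <;> simp

theorem alt_nil : analyze_blocks_alt [] = [[]] :=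
  alt_eq_none [] rfl

theorem alt_cons_blank (l : String) (rest : List String) (hl : PySem.Str.strip l = "") :
    analyze_blocks_alt (l :: rest) = [] :: analyze_blocks_alt rest := by
  have h0 : pvFirstBlank (l :: rest) = some 0 := by simp [pvFirstBlank, hl]
  rw [alt_eq_some _ 0 h0]
  simp

theorem alt_cons_nonblank (l : String) (rest : List String) (hl : ¬ PySem.Str.strip l = "")
    (h : List String) (t : List (List String)) (hres : analyze_blocks_alt rest = h :: t) :
    analyze_blocks_alt (l :: rest) = (l :: h) :: t := by
  cases hr : pvFirstBlank rest with
  | none =>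
    rw [alt_eq_none rest hr] at hres
    cases hres
    rw [alt_eq_none (l :: rest) (by simp [pvFirstBlank, hl, hr])]
  | some i =>
    rw [alt_eq_some rest i hr] at hres
    cases hres
    rw [alt_eq_some (l :: rest) (i + 1) (by simp [pvFirstBlank, hl, hr])]
    simp

theorem pvStepA_concat (bs : List (List String)) (c : List String) (l : String)
    (hl : ¬ PySem.Str.strip l = "") : pvStepA (bs ++ [c]) l = bs ++ [c ++ [l]] := by
  simp [pvStepA, hl]

-- A's loop body never touches any block before the last one
theorem foldl_stepA_append (f : List String) : ∀ (bs : List (List String)) (c : List String),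
    List.foldl pvStepA (bs ++ [c]) f = bs ++ List.foldl pvStepA [c] f := by
  induction f with
  | nil => intro bs c; simp
  | cons l rest ih =>
    intro bs c
    by_cases hl : PySem.Str.strip l = ""
    · simp only [List.foldl_cons, pvStepA, hl, if_pos]
      rw [show bs ++ [c] ++ [([] : List String)] = (bs ++ [c]) ++ [[]] from rfl, ih,
          show ([c] ++ [([] : List String)]) = [c] ++ [[]] from rfl, ih]
      simp
    · simp only [List.foldl_cons]
      rw [pvStepA_concat bs c l hl,
          show ([c] : List (List String)) = [] ++ [c] from rfl, pvStepA_concat [] c l hl,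
          ih bs (c ++ [l])]
      simp

-- the loop state with last block c computes: B's result with c prepended into the head block
theorem foldl_stepA_alt (f : List String) : ∀ (c : List String) (h : List String) (t : List (List String)),
    analyze_blocks_alt f = h :: t → List.foldl pvStepA [c] f = (c ++ h) :: t := by
  induction f with
  | nil =>
    intro c h t hres
    rw [alt_nil] at hres
    cases hres
    simp
  | cons l rest ih =>
    intro c h t hres
    by_cases hl : PySem.Str.strip l = ""
    · rw [alt_cons_blank l rest hl] at hres
      simp only [List.foldl_cons, pvStepA, hl, if_pos]
      rw [show ([c] ++ [([] : List String)]) = [c] ++ [[]] from rfl, foldl_stepA_append]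
      cases hr : analyze_blocks_alt rest with
      | nil => exact absurd hr (alt_ne_nil rest)
      | cons h' t' =>
        rw [hr] at hres
        cases hres
        rw [ih [] _ _ hr]
        simp
    · cases hr : analyze_blocks_alt rest with
      | nil => exact absurd hr (alt_ne_nil rest)
      | cons h' t' =>
        rw [alt_cons_nonblank l rest hl h' t' hr] at hres
        cases hres
        simp only [List.foldl_cons]
        rw [show ([c] : List (List String)) = [] ++ [c] from rfl, pvStepA_concat [] c l hl]
        rw [show ([] ++ [c ++ [l]] : List (List String)) = [c ++ [l]] from rfl,
            ih (c ++ [l]) _ _ hr]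
        simp

-- ===== VERDICT (by name: the statement is the Claim_ definition above) =====
theorem analyze_blocks_spec : Claim_equal_analyze_blocks := by
  intro f _
  unfold Spec_analyze_blocks analyze_blocks
  cases hr : analyze_blocks_alt f with
  | nil => exact absurd hr (alt_ne_nil f)
  | cons h t => rw [foldl_stepA_alt f [] h t hr]; simp
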